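-- pv_equiv track=rewrite | github.com/JBRS307/WDI | list6/zad22.py | check_jumps_rec
-- ===== SOURCE A (Python) =====
-- from math import isqrt
--
-- def is_prime(n):
--     if n == 2 or n == 3:
--         return True
--     if n%2 == 0 or n%3 == 0 or n <= 1:
--         return False
--
--     for i in range(5, isqrt(n)+1, 6):
--         if n%i == 0 or n%(i+2) == 0:
--             return False
--     return True
--
-- def check_jumps_rec(arr, i=0, jumps=0):
--     if i == len(arr)-1:
--         return True, jumps
--
--     for k in range(2, len(arr)-i):
--         if i+k <= len(arr):
--             if k < arr[i] and arr[i]%k == 0 and is_prime(k):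
--                 possible, total_jumps = check_jumps_rec(arr, i+k, jumps+1)
--                 if possible:
--                     return True, total_jumps
--
--     return False, -1
-- ===== SOURCE B (Python) =====
-- from math import isqrt
--
-- # module helper reused unchanged (same as in the original module)
-- def is_prime(n):
--     if n == 2 or n == 3:
--         return True
--     if n%2 == 0 or n%3 == 0 or n <= 1:
--         return False
--     for i in range(5, isqrt(n)+1, 6):
--         if n%i == 0 or n%(i+2) == 0:
--             return False
--     return True
--
-- def check_jumps_rec(arr, i=0, jumps=0):
--     n = len(arr)
--     if i == n - 1:
--         return True, jumps
--     if i < 0 or i >= n: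
--         return False, -1
--     # Memoized DP over indices: steps(j) = jump count of the path the
--     # smallest-prime-first search takes from j, or None if the end is unreachable.
--     memo = {}
--     def steps(j):
--         if j == n - 1:
--             return 0
--         if j in memo:
--             return memo[j]
--         res = None
--         for k in range(2, n - j):
--             if k < arr[j] and arr[j] % k == 0 and is_prime(k) and steps(j + k) is not None:
--                 res = 1 + steps(j + k)
--                 break
--         memo[j] = res
--         return res
--     s = steps(i)
--     if s is None:
--         return False, -1
--     return True, jumps + s
-- ===== Notes on version B (the rewrite author's own statement) =====
-- stated objective: alternative
-- what changed: Replaces A's memoization-free exponential DFS (which re-solves the same suffix indices repeatedly) with a memoized DP over indices: steps(j) is computed once per index via a dict, and the jumps offset is added once at the end; the module's is_prime helper is reused.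
-- outside the precondition, e.g. on check_jumps_rec([0, 0, 9], -1, 0): A returns (True, 1), B returns (False, -1)
import Mathlib
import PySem

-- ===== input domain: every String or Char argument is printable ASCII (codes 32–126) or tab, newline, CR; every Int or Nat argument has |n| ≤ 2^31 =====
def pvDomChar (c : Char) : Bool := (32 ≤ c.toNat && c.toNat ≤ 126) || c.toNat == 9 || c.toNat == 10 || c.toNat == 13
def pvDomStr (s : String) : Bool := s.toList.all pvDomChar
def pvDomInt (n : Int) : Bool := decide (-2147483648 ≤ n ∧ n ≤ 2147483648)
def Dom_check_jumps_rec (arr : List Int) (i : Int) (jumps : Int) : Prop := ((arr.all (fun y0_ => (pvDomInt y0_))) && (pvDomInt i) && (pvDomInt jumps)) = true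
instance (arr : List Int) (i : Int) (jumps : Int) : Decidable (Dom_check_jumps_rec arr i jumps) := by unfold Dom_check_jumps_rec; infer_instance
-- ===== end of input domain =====

-- B replaces A's memoization-free exponential DFS with a memoized DP over indices
-- (one steps(j) value per index, jumps added once at the end; module's is_prime reused).

-- ===== PORT A =====
-- math.isqrt(n) for 0 ≤ n is exactly Nat.sqrt n.toNat (only called with 5 ≤ n here)
def pvIsqrt (n : Int) : Int := Int.ofNat (Nat.sqrt n.toNat)

-- shared module helper is_prime (identical in Source A and Source B)
def pv_is_prime (n : Int) : Bool :=
  if n = 2 ∨ n = 3 then true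
  else if PySem.Int.mod n 2 = 0 ∨ PySem.Int.mod n 3 = 0 ∨ n ≤ 1 then false
  else if (PySem.List.pyRange 5 (pvIsqrt n + 1) 6).any
            (fun i => PySem.Int.mod n i = 0 || PySem.Int.mod n (i + 2) = 0) then false
  else true

-- arr[i] (in range on every execution the claim admits; default 0 is never read there)
def pvAt (arr : List Int) (i : Int) : Int := (PySem.List.pyGet? arr i).getD 0

mutual
-- the for-loop 'for k in range(2, len(arr)-i)' with early return; k = kn + 2
def pvLoopA (arr : List Int) (i : Int) (jumps : Int) (kn : Nat) : Bool × Int :=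
  if h : ((kn : Int) + 2) < (arr.length : Int) - i then
    if (i + ((kn : Int) + 2) ≤ (arr.length : Int)) ∧
       ((kn : Int) + 2) < pvAt arr i ∧
       PySem.Int.mod (pvAt arr i) ((kn : Int) + 2) = 0 ∧
       pv_is_prime ((kn : Int) + 2) = true then
      let r := check_jumps_rec arr (i + ((kn : Int) + 2)) (jumps + 1)
      if r.1 then (true, r.2) else pvLoopA arr i jumps (kn + 1)
    else pvLoopA arr i jumps (kn + 1)
  else (false, -1)
termination_by (((arr.length : Int) - i).toNat, ((arr.length : Int) - i).toNat - kn)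
decreasing_by
  · apply Prod.Lex.left; omega
  · apply Prod.Lex.right; omega
  · apply Prod.Lex.right; omega

def check_jumps_rec (arr : List Int) (i : Int) (jumps : Int) : Bool × Int :=
  if i = (arr.length : Int) - 1 then (true, jumps)
  else pvLoopA arr i jumps 0
termination_by (((arr.length : Int) - i).toNat + 1, 0)
decreasing_by
  · apply Prod.Lex.left; omega
end

-- ===== PORT B =====
-- memoized steps(j): the closure's dict mutation is threaded as explicit state;
-- the inner 'for k in range(2, n-j)' with break is structural on the k list
def pvInner (arr : List Int) (j : Int)
    (stepsF : Int → PySem.Dict Int (Option Int) → Option Int × PySem.Dict Int (Option Int)) :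
    List Int → PySem.Dict Int (Option Int) → Option Int × PySem.Dict Int (Option Int)
  | [], memo => (none, memo)
  | k :: rest, memo =>
    if k < pvAt arr j ∧ PySem.Int.mod (pvAt arr j) k = 0 ∧ pv_is_prime k = true then
      match stepsF (j + k) memo with
      | (s1, m1) =>
        if s1 ≠ none then
          match stepsF (j + k) m1 with
          | (s2, m2) => (some (1 + s2.getD 0), m2)
        else pvInner arr j stepsF rest m1
    else pvInner arr j stepsF rest memo

-- steps(j); fuel is only a totality guard (the recursion deepens by ≥ 2 indices per level,
-- so the fuel used below is never exhausted)
def pvStepsF (arr : List Int) :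
    Nat → Int → PySem.Dict Int (Option Int) → Option Int × PySem.Dict Int (Option Int)
  | 0, _, memo => (none, memo)
  | fuel + 1, j, memo =>
    if j = (arr.length : Int) - 1 then (some 0, memo)
    else
      match PySem.Dict.get? memo j with
      | some v => (v, memo)
      | none =>
        match pvInner arr j (fun j' m' => pvStepsF arr fuel j' m')
            (PySem.List.pyRange 2 ((arr.length : Int) - j) 1) memo with
        | (res, m1) => (res, PySem.Dict.insert m1 j res)

def check_jumps_rec_alt (arr : List Int) (i : Int) (jumps : Int) : Bool × Int :=
  if i = (arr.length : Int) - 1 then (true, jumps)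
  else if i < 0 ∨ (arr.length : Int) ≤ i then (false, -1)
  else
    match (pvStepsF arr (arr.length + 1) i PySem.Dict.empty).1 with
    | none => (false, -1)
    | some s => (true, jumps + s)

-- ===== PRECONDITION & SPEC =====
-- Pre_ excludes negative start indices i, on which A either raises IndexError (i < -len(arr),
-- or i ≤ -3 on an empty arr) or returns a value produced by Python's accidental negative-index
-- wraparound of arr[i] combined with loop bounds computed from the un-wrapped i — an artefact
-- no caller of this i=0-rooted recursion would rely on.
def Pre_check_jumps_rec (_arr : List Int) (i : Int) (_jumps : Int) : Prop := 0 ≤ i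
instance (arr : List Int) (i : Int) (jumps : Int) : Decidable (Pre_check_jumps_rec arr i jumps) := by
  unfold Pre_check_jumps_rec; infer_instance

def pvWitness_check_jumps_rec : List Int × Int × Int := ([4, 1, 1], 0, 0)

def Spec_check_jumps_rec (arr : List Int) (i : Int) (jumps : Int) (out : Bool × Int) : Prop := out = check_jumps_rec_alt arr i jumps
instance (arr : List Int) (i : Int) (jumps : Int) (out : Bool × Int) : Decidable (Spec_check_jumps_rec arr i jumps out) := by unfold Spec_check_jumps_rec; infer_instance

-- ===== CLAIM (what is proved, stated in full; the proofs are below) =====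
def Claim_equal_check_jumps_rec : Prop := ∀ (arr : List Int) (i : Int) (jumps : Int), Dom_check_jumps_rec arr i jumps → Pre_check_jumps_rec arr i jumps → Spec_check_jumps_rec arr i jumps (check_jumps_rec arr i jumps)

-- ===== LEMMAS AND PROOFS =====

-- proof-side specification: pvSpecV arr j = jump count of the first (smallest-k-first) path
-- from index j to the last index, none if unreachable; mirrors the k-loop via pvSpecL (k = kn+2)
mutual
def pvSpecL (arr : List Int) (j : Nat) (kn : Nat) : Option Int :=
  if h : j + kn + 2 < arr.length then
    if ((kn : Int) + 2) < pvAt arr (j : Int) ∧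
       PySem.Int.mod (pvAt arr (j : Int)) ((kn : Int) + 2) = 0 ∧
       pv_is_prime ((kn : Int) + 2) = true then
      match pvSpecV arr (j + kn + 2) with
      | some s => some (1 + s)
      | none => pvSpecL arr j (kn + 1)
    else pvSpecL arr j (kn + 1)
  else none
termination_by (arr.length - j - 1, arr.length - j - kn)
decreasing_by
  · apply Prod.Lex.left; omega
  · apply Prod.Lex.right; omega
  · apply Prod.Lex.right; omega

def pvSpecV (arr : List Int) (j : Nat) : Option Int :=
  if j + 1 = arr.length then some 0
  else pvSpecL arr j 0
termination_by (arr.length - j, 1)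
decreasing_by
  rcases Nat.lt_or_ge (j+1) arr.length with h | h
  · apply Prod.Lex.left; omega
  · have h2 : arr.length - j - 1 = arr.length - j := by omega
    rw [h2]; apply Prod.Lex.right; omega
end

mutual
theorem pvLAloop (arr : List Int) (j : Nat) (kn : Nat) (jumps : Int) :
    pvLoopA arr (j : Int) jumps kn =
      (match pvSpecL arr j kn with
       | some s => (true, jumps + s)
       | none => (false, -1)) := by
  rw [pvLoopA, pvSpecL]
  by_cases hg : j + kn + 2 < arr.length
  · rw [dif_pos (by exact_mod_cast (by omega : ((kn : Int) + 2) < (arr.length : Int) - (j : Int))),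
        dif_pos hg]
    by_cases hc : ((kn : Int) + 2) < pvAt arr (j : Int) ∧
        PySem.Int.mod (pvAt arr (j : Int)) ((kn : Int) + 2) = 0 ∧
        pv_is_prime ((kn : Int) + 2) = true
    · rw [if_pos ⟨by omega, hc⟩, if_pos hc]
      have hcast : (j : Int) + ((kn : Int) + 2) = ((j + kn + 2 : Nat) : Int) := by omega
      rw [hcast, pvLAv arr (j + kn + 2) (jumps + 1)]
      cases hv : pvSpecV arr (j + kn + 2) with
      | some s => simp [add_assoc]
      | none => simpa using pvLAloop arr j (kn + 1) jumps
    · rw [if_neg (fun h => hc h.2), if_neg hc]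
      exact pvLAloop arr j (kn + 1) jumps
  · rw [dif_neg (by exact_mod_cast (by omega : ¬ ((kn : Int) + 2) < (arr.length : Int) - (j : Int))),
        dif_neg hg]
termination_by (arr.length - j - 1, arr.length - j - kn)
decreasing_by
  all_goals first
    | (apply Prod.Lex.right; omega)
    | (apply Prod.Lex.left; omega)

theorem pvLAv (arr : List Int) (j : Nat) (jumps : Int) :
    check_jumps_rec arr (j : Int) jumps =
      (match pvSpecV arr j with
       | some s => (true, jumps + s)
       | none => (false, -1)) := by
  rw [check_jumps_rec, pvSpecV]
  by_cases h : j + 1 = arr.length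
  · rw [if_pos (by exact_mod_cast (by omega : (j : Int) = (arr.length : Int) - 1)), if_pos h]
    simp
  · rw [if_neg (show ¬ (j : Int) = (arr.length : Int) - 1 by intro hcon; exact h (by omega)),
        if_neg h]
    exact pvLAloop arr j 0 jumps
termination_by (arr.length - j, 1)
decreasing_by
  rcases Nat.lt_or_ge (j + 1) arr.length with h2 | h2
  · apply Prod.Lex.left; omega
  · have h3 : arr.length - j - 1 = arr.length - j := by omega
    rw [h3]; apply Prod.Lex.right; omega
end
-- invariant: every memo entry stores the pvSpecV value of its (nonnegative) key
def pvMemOK (arr : List Int) (memo : PySem.Dict Int (Option Int)) : Prop :=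
  ∀ j v, PySem.Dict.get? memo j = some v → v = pvSpecV arr j.toNat

theorem pvInner_ok (arr : List Int) (j : Nat)
    (F : Int → PySem.Dict Int (Option Int) → Option Int × PySem.Dict Int (Option Int))
    (HF : ∀ (t : Nat) (m' : PySem.Dict Int (Option Int)), j + 2 ≤ t → pvMemOK arr m' →
      (F (t : Int) m').1 = pvSpecV arr t ∧ pvMemOK arr (F (t : Int) m').2)
    (kn : Nat) (memo : PySem.Dict Int (Option Int)) (hm : pvMemOK arr memo) :
    (pvInner arr (j : Int) F
        (PySem.List.pyRange ((kn : Int) + 2) ((arr.length : Int) - (j : Int)) 1) memo).1 =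
      pvSpecL arr j kn ∧
    pvMemOK arr (pvInner arr (j : Int) F
        (PySem.List.pyRange ((kn : Int) + 2) ((arr.length : Int) - (j : Int)) 1) memo).2 := by
  rw [pvSpecL]
  by_cases hg : j + kn + 2 < arr.length
  · rw [PySem.List.pyRange_one_cons (by omega), dif_pos hg]
    simp only [pvInner]
    by_cases hc : ((kn : Int) + 2) < pvAt arr (j : Int) ∧
        PySem.Int.mod (pvAt arr (j : Int)) ((kn : Int) + 2) = 0 ∧
        pv_is_prime ((kn : Int) + 2) = true
    · rw [if_pos hc, if_pos hc]
      have hcast : (j : Int) + ((kn : Int) + 2) = ((j + kn + 2 : Nat) : Int) := by omega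
      rw [hcast]
      obtain ⟨hs1, hm1⟩ := HF (j + kn + 2) memo (by omega) hm
      rcases hp : F ((j + kn + 2 : Nat) : Int) memo with ⟨s1, m1⟩
      rw [hp] at hs1 hm1
      simp only at hs1 hm1
      cases hv : pvSpecV arr (j + kn + 2) with
      | some v =>
        rw [hv] at hs1
        subst hs1
        rw [if_pos (by simp)]
        obtain ⟨hs2, hm2⟩ := HF (j + kn + 2) m1 (by omega) hm1
        rcases hp2 : F ((j + kn + 2 : Nat) : Int) m1 with ⟨s2, m2⟩
        rw [hp2] at hs2 hm2
        simp only at hs2 hm2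
        rw [hv] at hs2
        subst hs2
        exact ⟨rfl, hm2⟩
      | none =>
        rw [hv] at hs1
        subst hs1
        rw [if_neg (by simp)]
        have hnext : ((kn : Int) + 2) + 1 = (((kn + 1 : Nat)) : Int) + 2 := by omega
        rw [hnext]
        exact pvInner_ok arr j F HF (kn + 1) m1 hm1
    · rw [if_neg hc, if_neg hc]
      have hnext : ((kn : Int) + 2) + 1 = (((kn + 1 : Nat)) : Int) + 2 := by omega
      rw [hnext]
      exact pvInner_ok arr j F HF (kn + 1) memo hm
  · rw [PySem.List.pyRange_one_eq_nil (by omega), dif_neg hg]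
    simp only [pvInner]
    exact ⟨trivial, hm⟩
termination_by arr.length - j - kn
decreasing_by all_goals omega

theorem pvStepsF_ok (arr : List Int) (fuel : Nat) :
    ∀ (j : Nat) (memo : PySem.Dict Int (Option Int)),
      (arr.length : Int) - (j : Int) ≤ (fuel : Int) → pvMemOK arr memo →
      (pvStepsF arr fuel (j : Int) memo).1 = pvSpecV arr j ∧
        pvMemOK arr (pvStepsF arr fuel (j : Int) memo).2 := by
  induction fuel with
  | zero =>
    intro j memo hfuel hm
    simp only [pvStepsF]
    rw [pvSpecV, if_neg (by omega), pvSpecL, dif_neg (by omega)]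
    exact ⟨rfl, hm⟩
  | succ fuel ih =>
    intro j memo hfuel hm
    simp only [pvStepsF]
    rw [pvSpecV]
    by_cases h : j + 1 = arr.length
    · rw [if_pos (by omega : (j : Int) = (arr.length : Int) - 1), if_pos h]
      exact ⟨rfl, hm⟩
    · rw [if_neg (by omega : ¬ (j : Int) = (arr.length : Int) - 1), if_neg h]
      cases hv : PySem.Dict.get? memo (j : Int) with
      | some v =>
        have := hm _ _ hv
        simp only [Int.toNat_natCast] at this
        rw [pvSpecV, if_neg h] at this
        exact ⟨this, hm⟩
      | none =>
        have HF : ∀ (t : Nat) (m' : PySem.Dict Int (Option Int)), j + 2 ≤ t → pvMemOK arr m' →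
            (pvStepsF arr fuel (t : Int) m').1 = pvSpecV arr t ∧
              pvMemOK arr (pvStepsF arr fuel (t : Int) m').2 :=
          fun t m' ht hm' => ih t m' (by omega) hm'
        have hin := pvInner_ok arr j (fun j' m' => pvStepsF arr fuel j' m') HF 0 memo hm
        norm_num at hin
        rcases hp : pvInner arr (j : Int) (fun j' m' => pvStepsF arr fuel j' m')
            (PySem.List.pyRange 2 ((arr.length : Int) - (j : Int)) 1) memo with ⟨res, m1⟩
        rw [hp] at hin
        simp only at hin
        obtain ⟨hres, hm1⟩ := hin
        refine ⟨hres, fun j' v hget => ?_⟩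
        rw [PySem.Dict.get?_insert] at hget
        by_cases hj' : j' = (j : Int)
        · rw [if_pos hj'] at hget
          cases hget
          rw [hj', Int.toNat_natCast, pvSpecV, if_neg h]
          exact hres
        · rw [if_neg hj'] at hget
          exact hm1 _ _ hget

theorem pvMemOK_empty (arr : List Int) : pvMemOK arr PySem.Dict.empty := by
  intro j v h
  simp [PySem.Dict.get?_empty] at h

-- ===== VERDICT (by name: the statement is the Claim_ definition above) =====
theorem check_jumps_rec_spec : Claim_equal_check_jumps_rec := by
  intro arr i jumps _ hpre
  unfold Spec_check_jumps_rec
  have hi : ((i.toNat : Nat) : Int) = i := Int.toNat_of_nonneg hpre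
  rw [← hi]
  set j : Nat := i.toNat with hjdef
  rw [pvLAv arr j jumps]
  unfold check_jumps_rec_alt
  by_cases h1 : (j : Int) = (arr.length : Int) - 1
  · rw [if_pos h1, pvSpecV, if_pos (by omega)]
    simp
  · rw [if_neg h1]
    by_cases h2 : (arr.length : Int) ≤ (j : Int)
    · rw [if_pos (Or.inr h2), pvSpecV, if_neg (by omega), pvSpecL, dif_neg (by omega)]
    · rw [if_neg (by omega)]
      rw [(pvStepsF_ok arr (arr.length + 1) j PySem.Dict.empty (by omega) (pvMemOK_empty arr)).1]
      cases pvSpecV arr j <;> rfl
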